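-- pv_equiv track=rewrite | github.com/faxriddin1908-dev/Assignment-week-6 | week 6 assignment.py | find_most_popular_course
-- ===== SOURCE A (Python) =====
-- def find_most_popular_course(course_data):
--     best_course = None
--     best_avg = -1
--
--     for course_code, department, enrollments in course_data:
--         avg = sum(enrollments)
--         if avg < best_avg or best_course is None:
--             best_avg = avg
--             best_course = course_code
--         elif avg == best_avg:
--             if course_code > best_course:
--                 best_course = course_code
--     return best_course
-- ===== SOURCE B (Python) =====
-- def find_most_popular_course(course_data):
--     table = [(sum(enrollments), code) for code, _dept, enrollments in course_data]
--     if not table: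
--         return None
--     m = min(s for s, _ in table)
--     return max(code for s, code in table if s == m)
-- ===== Notes on version B (the rewrite author's own statement) =====
-- stated objective: simpler
-- what changed: Replaces the single stateful best/avg loop with a table of (sum, code) pairs and two plain passes: min of the sums, then max code among the minimum-sum entries.
import Mathlib
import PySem

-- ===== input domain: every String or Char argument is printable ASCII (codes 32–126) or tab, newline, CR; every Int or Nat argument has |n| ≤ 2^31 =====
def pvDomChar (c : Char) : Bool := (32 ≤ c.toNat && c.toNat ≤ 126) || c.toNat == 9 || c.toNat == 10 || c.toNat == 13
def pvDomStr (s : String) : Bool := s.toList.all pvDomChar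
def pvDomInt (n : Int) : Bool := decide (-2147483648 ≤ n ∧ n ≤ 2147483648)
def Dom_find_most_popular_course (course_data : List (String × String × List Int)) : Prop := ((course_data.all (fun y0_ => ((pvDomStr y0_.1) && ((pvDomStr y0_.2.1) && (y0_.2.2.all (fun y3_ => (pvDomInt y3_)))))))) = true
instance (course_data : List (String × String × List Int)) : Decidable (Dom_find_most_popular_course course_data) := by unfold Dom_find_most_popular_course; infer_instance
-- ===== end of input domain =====

-- B rewrites the stateful best/avg loop as a (sum, code) table with two plain passes (min of sums, then max code at the min); objective: simpler.

-- ===== PORT A =====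
def find_most_popular_course (course_data : List (String × String × List Int)) : Option String :=
  (course_data.foldl
    (fun st c =>
      let avg := c.2.2.sum
      if avg < st.2 || st.1 == none then (some c.1, avg)
      else if avg == st.2 then
        (match st.1 with
         | some best => if best < c.1 then (some c.1, st.2) else st
         | none => st)
      else st)
    ((none : Option String), (-1 : Int))).1

-- ===== PORT B =====
-- helper: "min of the sums, then max code among entries whose sum equals the min" over the table
def pvBt (t : List (Int × String)) : Option String :=
  match PySem.List.min? (t.map Prod.fst) (fun x => x) with
  | none => none
  | some m => PySem.List.max? ((t.filter (fun p => p.1 == m)).map Prod.snd) (fun x => x)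

def find_most_popular_course_alt (course_data : List (String × String × List Int)) : Option String :=
  let table := course_data.map (fun c => (c.2.2.sum, c.1))
  if table.isEmpty then none else pvBt table

-- ===== PRECONDITION & SPEC =====
def Spec_find_most_popular_course (course_data : List (String × String × List Int)) (out : Option String) : Prop := out = find_most_popular_course_alt course_data
instance (course_data : List (String × String × List Int)) (out : Option String) : Decidable (Spec_find_most_popular_course course_data out) := by unfold Spec_find_most_popular_course; infer_instance

-- ===== CLAIM (what is proved, stated in full; the proofs are below) =====
def Claim_equal_find_most_popular_course : Prop := ∀ (course_data : List (String × String × List Int)), Dom_find_most_popular_course course_data → Spec_find_most_popular_course course_data (find_most_popular_course course_data)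

-- ===== LEMMAS AND PROOFS =====

-- the loop step of port A, seen as a function of (sum, code)
def pvG (st : Option String × Int) (e : Int × String) : Option String × Int :=
  if e.1 < st.2 || st.1 == none then (some e.2, e.1)
  else if e.1 == st.2 then
    (match st.1 with
     | some best => if best < e.2 then (some e.2, st.2) else st
     | none => st)
  else st

-- the combined best of two table entries in A's order
def pvComb (v : Int) (b : String) (s : Int) (c : String) : Int × String :=
  if s < v then (s, c) else if s = v then (if b < c then (v, c) else (v, b)) else (v, b)

lemma pvG_some (v : Int) (b : String) (s : Int) (c : String) :
    pvG (some b, v) (s, c) = (some (pvComb v b s c).2, (pvComb v b s c).1) := by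
  simp only [pvG, pvComb]
  by_cases h1 : s < v
  · simp [h1]
  · by_cases h2 : s = v
    · by_cases h3 : b < c <;> simp [h2, h3]
    · simp [h1, h2]

lemma foldl_min_le (t : List Int) (a : Int) : t.foldl min a ≤ a := by
  induction t generalizing a with
  | nil => exact le_refl a
  | cons x xs ih =>
    calc (x :: xs).foldl min a = xs.foldl min (min a x) := rfl
    _ ≤ min a x := ih _
    _ ≤ a := min_le_left _ _

-- dropping a non-minimal head entry keeps B's answer
lemma pvBt_drop_fst (v s : Int) (b c : String) (t : List (Int × String)) (h : s < v) :
    pvBt ((v, b) :: (s, c) :: t) = pvBt ((s, c) :: t) := by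
  unfold pvBt
  simp only [List.map_cons]
  rw [PySem.List.min?_id_cons, PySem.List.min?_id_cons]
  have hfold : (s :: t.map Prod.fst).foldl min v = (t.map Prod.fst).foldl min s := by
    show (t.map Prod.fst).foldl min (min v s) = _
    rw [min_eq_right (le_of_lt h)]
  rw [hfold]
  have hle := foldl_min_le (t.map Prod.fst) s
  have hvne : ¬ (v = (t.map Prod.fst).foldl min s) := by omega
  simp [List.filter_cons, beq_iff_eq, hvne]

lemma pvBt_drop_snd (v s : Int) (b c : String) (t : List (Int × String)) (h : v < s) :
    pvBt ((v, b) :: (s, c) :: t) = pvBt ((v, b) :: t) := by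
  unfold pvBt
  simp only [List.map_cons]
  rw [PySem.List.min?_id_cons, PySem.List.min?_id_cons]
  have hfold : (s :: t.map Prod.fst).foldl min v = (t.map Prod.fst).foldl min v := by
    show (t.map Prod.fst).foldl min (min v s) = _
    rw [min_eq_left (le_of_lt h)]
  rw [hfold]
  have hle := foldl_min_le (t.map Prod.fst) v
  have hsne : ¬ (s = (t.map Prod.fst).foldl min v) := by omega
  simp [List.filter_cons, beq_iff_eq, hsne]

-- two entries with the same sum merge into one carrying the larger code
lemma pvBt_merge (v : Int) (b c : String) (t : List (Int × String)) :
    pvBt ((v, b) :: (v, c) :: t) = pvBt ((v, max b c) :: t) := by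
  unfold pvBt
  simp only [List.map_cons]
  rw [PySem.List.min?_id_cons, PySem.List.min?_id_cons]
  have hfold : (v :: t.map Prod.fst).foldl min v = (t.map Prod.fst).foldl min v := by
    show (t.map Prod.fst).foldl min (min v v) = _
    rw [min_self]
  rw [hfold]
  by_cases hv : v = (t.map Prod.fst).foldl min v
  · simp only [List.filter_cons, beq_iff_eq, ← hv, if_true, List.map_cons]
    rw [PySem.List.max?_id_cons, PySem.List.max?_id_cons]
    rfl
  · simp [beq_iff_eq, hv]

-- the key step lemma: merging the first two table entries with pvComb keeps B's answer
lemma pvBt_comb (t : List (Int × String)) (v : Int) (b : String) (s : Int) (c : String) :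
    pvBt ((v, b) :: (s, c) :: t) = pvBt (pvComb v b s c :: t) := by
  by_cases h1 : s < v
  · rw [show pvComb v b s c = (s, c) from by simp [pvComb, h1], pvBt_drop_fst _ _ _ _ _ h1]
  · by_cases h2 : s = v
    · subst h2
      have hcmb : pvComb s b s c = (s, max b c) := by
        by_cases h3 : b < c
        · simp [pvComb, h3, max_eq_right (le_of_lt h3)]
        · simp [pvComb, h3, max_eq_left (le_of_not_gt h3)]
      rw [hcmb, pvBt_merge]
    · have h4 : v < s := by omega
      rw [show pvComb v b s c = (v, b) from by simp [pvComb, h1, h2], pvBt_drop_snd _ _ _ _ _ h4]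

lemma pvBt_singleton (v : Int) (b : String) : pvBt [(v, b)] = some b := by
  unfold pvBt
  rw [show ([(v, b)].map Prod.fst) = [v] from rfl, PySem.List.min?_id_cons]
  simp [PySem.List.max?_id_cons]

-- loop invariant: folding pvG from a live state computes B's answer on the extended table
lemma foldl_pvG (t : List (Int × String)) (v : Int) (b : String) :
    (t.foldl pvG (some b, v)).1 = pvBt ((v, b) :: t) := by
  induction t generalizing v b with
  | nil => simp [pvBt_singleton]
  | cons e t ih =>
    obtain ⟨s, c⟩ := e
    rw [List.foldl_cons, pvG_some, ih, ← pvBt_comb]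

-- ===== VERDICT (by name: the statement is the Claim_ definition above) =====
theorem find_most_popular_course_spec : Claim_equal_find_most_popular_course := by
  intro l _
  unfold Spec_find_most_popular_course find_most_popular_course find_most_popular_course_alt
  cases l with
  | nil => rfl
  | cons x xs =>
    have hfold : ∀ (init : Option String × Int),
        (x :: xs).foldl
          (fun st (c : String × String × List Int) =>
            let avg := c.2.2.sum
            if avg < st.2 || st.1 == none then (some c.1, avg)
            else if avg == st.2 then
              (match st.1 with
               | some best => if best < c.1 then (some c.1, st.2) else st
               | none => st)
            else st) init
        = ((x :: xs).map (fun c => (c.2.2.sum, c.1))).foldl pvG init := by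
      intro init
      rw [List.foldl_map]
      rfl
    rw [hfold]
    have hstep : pvG ((none : Option String), (-1 : Int)) (x.2.2.sum, x.1)
        = (some x.1, x.2.2.sum) := by
      simp [pvG]
    simp only [List.map_cons, List.foldl_cons, hstep, foldl_pvG]
    rfl
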